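-- pv_equiv track=rewrite | github.com/LauraMarras/GH_data_analysis | Preprocessing/Read_electrodes_locs.py | shaft_electrodes
-- ===== SOURCE A (Python) =====
-- def shaft_electrodes(elec_list):
--     elec_dict = {}
--     for e in elec_list:
--         lab = e[0:2]
--         if len(e)>3:
--             num = e[-2:]
--         else:
--             num = e[-1]
--         if lab not in elec_dict.keys():
--             elec_dict[lab] = [num]
--         else:
--             elec_dict[lab].append(num)
--     return elec_dict
-- ===== SOURCE B (Python) =====
-- def shaft_electrodes(elec_list):
--     # Two-pass grouping: collect the distinct labels in first-seen order,
--     # then build each group's number list with one filtered pass.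
--     labels = list(dict.fromkeys(e[0:2] for e in elec_list))
--     return {lab: [e[-2:] if len(e) > 3 else e[-1]
--                   for e in elec_list if e[0:2] == lab]
--             for lab in labels}
-- ===== Notes on version B (the rewrite author's own statement) =====
-- stated objective: alternative
-- what changed: Replaces the incremental first-seen dict mutation (insert-or-append per element) with a two-pass scheme: first dedup the labels in first-seen order, then build each group's list by a filtered comprehension over the whole input; Pre_ excludes lists containing an empty string, on which both implementations raise IndexError at e[-1].
import Mathlib
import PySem

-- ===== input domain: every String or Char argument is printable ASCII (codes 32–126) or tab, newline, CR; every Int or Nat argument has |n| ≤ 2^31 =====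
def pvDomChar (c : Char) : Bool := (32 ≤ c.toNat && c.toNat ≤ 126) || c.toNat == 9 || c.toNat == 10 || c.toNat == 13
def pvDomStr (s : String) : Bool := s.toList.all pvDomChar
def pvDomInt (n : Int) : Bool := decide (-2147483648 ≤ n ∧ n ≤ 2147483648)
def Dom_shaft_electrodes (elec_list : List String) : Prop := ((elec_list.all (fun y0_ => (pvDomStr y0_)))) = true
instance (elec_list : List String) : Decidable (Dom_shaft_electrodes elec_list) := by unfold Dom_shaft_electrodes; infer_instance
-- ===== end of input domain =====

-- B groups by two passes (dedup the labels in first-seen order, then one filtered pass per label)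
-- instead of A's incremental dict mutation; equivalence is about the return value.

-- shared helpers for the two ports: lab = e[0:2]; num = e[-2:] if len(e)>3 else e[-1]
def pvLab (e : String) : String := PySem.Str.slice e (some 0) (some 2)

-- 'e[-1]' raises IndexError on the empty string (excluded by Pre_); '""' stands for that raise
def pvNum (e : String) : String :=
  if PySem.Str.len e > 3 then PySem.Str.slice e (some (-2)) none
  else
    match PySem.Str.pyGet? e (-1) with
    | some c => String.singleton c
    | none => ""

-- ===== PORT A =====
def shaftA_loop : List String → PySem.Dict String (List String) → PySem.Dict String (List String)
  | [], d => d
  | e :: rest, d =>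
      let lab := pvLab e
      let num := pvNum e
      let d' := if d.contains lab = false then d.insert lab [num]
                else d.modify lab [] (fun l => l ++ [num])
      shaftA_loop rest d'

def shaft_electrodes (elec_list : List String) : List (String × List String) :=
  (shaftA_loop elec_list PySem.Dict.empty).items

-- ===== PORT B =====
def shaft_electrodes_alt (elec_list : List String) : List (String × List String) :=
  let labels := PySem.List.dedup (elec_list.map pvLab)
  labels.map (fun lab => (lab, (elec_list.filter (fun e => pvLab e == lab)).map pvNum))

-- ===== PRECONDITION & SPEC =====
-- Pre_ excludes lists containing an empty string, on which Python A (and B) raise IndexError at e[-1].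
def Pre_shaft_electrodes (elec_list : List String) : Prop := ∀ e ∈ elec_list, e ≠ ""
instance (elec_list : List String) : Decidable (Pre_shaft_electrodes elec_list) := by unfold Pre_shaft_electrodes; infer_instance
def pvWitness_shaft_electrodes : List String := ["RF1", "RF2", "RF10", "AM3"]

def Spec_shaft_electrodes (elec_list : List String) (out : List (String × List String)) : Prop := out = shaft_electrodes_alt elec_list
instance (elec_list : List String) (out : List (String × List String)) : Decidable (Spec_shaft_electrodes elec_list out) := by unfold Spec_shaft_electrodes; infer_instance

-- ===== CLAIM (what is proved, stated in full; the proofs are below) =====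
def Claim_equal_shaft_electrodes : Prop := ∀ (elec_list : List String), Dom_shaft_electrodes elec_list → Pre_shaft_electrodes elec_list → Spec_shaft_electrodes elec_list (shaft_electrodes elec_list)

-- ===== LEMMAS AND PROOFS =====

-- dedup of a snoc: append the element iff it is new
theorem pvDedup_snoc {α : Type} [BEq α] [LawfulBEq α] (xs : List α) (x : α) :
    PySem.List.dedup (xs ++ [x]) =
      if x ∈ xs then PySem.List.dedup xs else PySem.List.dedup xs ++ [x] := by
  have h1 : PySem.List.dedup (xs ++ [x]) = PySem.Set.add (PySem.List.dedup xs) x := by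
    simp [PySem.List.dedup, PySem.Set.ofList, List.foldl_append]
  rw [h1, PySem.Set.add]
  by_cases h : x ∈ xs
  · have hm : x ∈ PySem.List.dedup xs := by
      rw [PySem.List.dedup_eq_ofList]; exact (PySem.Set.mem_ofList xs x).mpr h
    rw [if_pos ((PySem.Set.contains_iff _ x).mpr hm), if_pos h]
  · have hm : x ∉ PySem.List.dedup xs := by
      rw [PySem.List.dedup_eq_ofList]
      exact fun hm => h ((PySem.Set.mem_ofList xs x).mp hm)
    rw [if_neg (fun hc => hm ((PySem.Set.contains_iff _ x).mp hc)), if_neg h]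

-- loop invariant: after processing prefix p, the dict's keys are the deduped labels of p
-- (first-seen order) and each key holds the numbers of p's matching elements, in order.
theorem pvLoop_inv (rest : List String) :
    ∀ (p : List String) (d : PySem.Dict String (List String)),
      d.keys = PySem.List.dedup (p.map pvLab) →
      (∀ lab, d.getD lab [] = (p.filter (fun e => pvLab e == lab)).map pvNum) →
      d.keys.Nodup →
      (shaftA_loop rest d).keys = PySem.List.dedup ((p ++ rest).map pvLab) ∧
      (∀ lab, (shaftA_loop rest d).getD lab [] =
        ((p ++ rest).filter (fun e => pvLab e == lab)).map pvNum) ∧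
      (shaftA_loop rest d).keys.Nodup := by
  induction rest with
  | nil => intro p d hk hg hn; simpa using ⟨hk, hg, hn⟩
  | cons e rest ih =>
    intro p d hk hg hn
    have hmem : pvLab e ∈ p.map pvLab ↔ d.contains (pvLab e) = true := by
      rw [PySem.Dict.contains_iff_mem_keys, hk, PySem.List.dedup_eq_ofList, PySem.Set.mem_ofList]
    have hsplit : p ++ e :: rest = (p ++ [e]) ++ rest := by simp
    rw [hsplit]
    by_cases hc : d.contains (pvLab e) = true
    · -- label already present: append to its list
      have hstep : shaftA_loop (e :: rest) d
          = shaftA_loop rest (d.modify (pvLab e) [] (fun l => l ++ [pvNum e])) := by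
        simp [shaftA_loop, hc]
      rw [hstep]
      refine ih (p ++ [e]) _ ?_ ?_ ?_
      · rw [PySem.Dict.keys_modify, PySem.Dict.keys_insert_of_contains d _ hc, hk,
          List.map_append, List.map_singleton, pvDedup_snoc, if_pos (hmem.mpr hc)]
      · intro lab
        rw [PySem.Dict.getD_modify, List.filter_append, List.map_append]
        by_cases hl : lab = pvLab e
        · subst hl
          simp [hg]
        · have hne : ¬ (pvLab e == lab) = true := by
            simp only [beq_iff_eq]; exact Ne.symm hl
          simp [hl, hg lab, List.filter, hne]
      · rw [PySem.Dict.keys_modify, PySem.Dict.keys_insert_of_contains d _ hc]; exact hn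
    · -- new label: insert a fresh singleton list
      have hc' : d.contains (pvLab e) = false := by simpa using hc
      have hstep : shaftA_loop (e :: rest) d
          = shaftA_loop rest (d.insert (pvLab e) [pvNum e]) := by
        simp [shaftA_loop, hc']
      rw [hstep]
      have hnm : pvLab e ∉ p.map pvLab := fun h => hc (hmem.mp h)
      refine ih (p ++ [e]) _ ?_ ?_ ?_
      · rw [PySem.Dict.keys_insert_of_not_contains d _ hc', hk,
          List.map_append, List.map_singleton, pvDedup_snoc, if_neg hnm]
      · intro lab
        rw [PySem.Dict.getD_insert, List.filter_append, List.map_append]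
        by_cases hl : lab = pvLab e
        · subst hl
          have hfil : p.filter (fun e' => pvLab e' == pvLab e) = [] := by
            rw [List.filter_eq_nil_iff]
            intro a ha hbeq
            exact hnm (by
              have : pvLab a = pvLab e := by simpa using hbeq
              exact this ▸ List.mem_map_of_mem ha)
          simp [hfil]
        · have hne : ¬ (pvLab e == lab) = true := by
            simp only [beq_iff_eq]; exact Ne.symm hl
          simp [hl, hg lab, List.filter, hne]
      · exact PySem.Dict.nodup_keys_insert d _ _ hn

-- ===== VERDICT (by name: the statement is the Claim_ definition above) =====
theorem shaft_electrodes_spec : Claim_equal_shaft_electrodes := by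
  intro elec_list _ _
  unfold Spec_shaft_electrodes shaft_electrodes shaft_electrodes_alt
  obtain ⟨hk, hg, hn⟩ := pvLoop_inv elec_list [] PySem.Dict.empty
    (by rw [PySem.Dict.keys_empty]; rfl)
    (by intro lab; simp [PySem.Dict.getD_empty])
    PySem.Dict.nodup_keys_empty
  rw [PySem.Dict.items_eq_map_keys _ hn [], hk]
  simp only [List.nil_append] at *
  apply List.map_congr_left
  intro lab _
  rw [hg lab]
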